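-- pv_equiv track=rewrite | github.com/Cardinal-Fang-78/thn-cli | cli_structure_verify.py | _resolve_presence
-- ===== SOURCE A (Python) =====
-- from typing import Any, Dict, List, Tuple
--
-- REQUIRED = [
--     "commands",
--     "routing",
--     "ui",
--     "hub",
--     "plugins",
--     "tasks",
--     "blueprints",
--     "__init__.py",
--     "__main__.py",
--     "pathing.py",
--     "command_loader.py",
-- ]
--
-- def _resolve_presence(existing: List[str]) -> Tuple[List[str], List[str]]:
--     """
--     Compare REQUIRED list against the filesystem.
--     Returns:
--         (present, missing)
--     """
--     present = []
--     missing = []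
--
--     for req in REQUIRED:
--         if any(path.endswith(req) for path in existing):
--             present.append(req)
--         else:
--             missing.append(req)
--
--     return present, missing
-- ===== SOURCE B (Python) =====
-- from typing import List, Tuple
--
-- REQUIRED = [
--     "commands",
--     "routing",
--     "ui",
--     "hub",
--     "plugins",
--     "tasks",
--     "blueprints",
--     "__init__.py",
--     "__main__.py",
--     "pathing.py",
--     "command_loader.py",
-- ]
--
-- def _resolve_presence(existing: List[str]) -> Tuple[List[str], List[str]]:
--     # No endswith at all: for each path, extract its suffix of each length that
--     # occurs in REQUIRED and look it up by hash in a set of required names;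
--     # any hit IS the matched required name. Then partition REQUIRED by the
--     # found-set.
--     by_name = set(REQUIRED)
--     lengths = sorted({len(r) for r in REQUIRED})
--     found = set()
--     for path in existing:
--         n = len(path)
--         for L in lengths:
--             if L <= n:
--                 tail = path[n - L:]
--                 if tail in by_name:
--                     found.add(tail)
--     present = [r for r in REQUIRED if r in found]
--     missing = [r for r in REQUIRED if r not in found]
--     return present, missing
-- ===== Notes on version B (the rewrite author's own statement) =====
-- stated objective: faster
-- what changed: Replaces the per-required any(endswith) scans entirely: B iterates the paths once, slices each path's suffix at each distinct REQUIRED length and hash-looks the slice up in a set of required names (the hit itself is the matched name), then partitions REQUIRED by the found-set; no endswith comparison occurs anywhere.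
import Mathlib
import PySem

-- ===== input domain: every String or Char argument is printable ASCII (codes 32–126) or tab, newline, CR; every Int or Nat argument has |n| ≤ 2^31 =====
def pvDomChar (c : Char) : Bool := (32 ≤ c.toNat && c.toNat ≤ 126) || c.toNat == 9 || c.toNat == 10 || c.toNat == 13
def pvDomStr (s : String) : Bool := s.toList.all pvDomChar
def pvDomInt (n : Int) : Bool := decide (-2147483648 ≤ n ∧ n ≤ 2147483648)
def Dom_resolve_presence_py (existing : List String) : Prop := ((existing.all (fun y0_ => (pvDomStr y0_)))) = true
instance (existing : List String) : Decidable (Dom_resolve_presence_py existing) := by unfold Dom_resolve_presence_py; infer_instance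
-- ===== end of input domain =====

-- B drops endswith entirely: it slices each path's suffix at each distinct REQUIRED
-- length and hash-looks the slice up in a set of required names, then partitions
-- REQUIRED by the found-set (alternative decomposition, same asymptotic cost).

def REQUIRED : List String :=
  ["commands", "routing", "ui", "hub", "plugins", "tasks", "blueprints",
   "__init__.py", "__main__.py", "pathing.py", "command_loader.py"]

-- ===== PORT A =====
def resolve_presence_py (existing : List String) : List String × List String :=
  REQUIRED.foldl
    (fun acc req =>
      if existing.any (fun path => PySem.Str.endswith path req) then
        (acc.1 ++ [req], acc.2)
      else
        (acc.1, acc.2 ++ [req]))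
    ([], [])

-- ===== PORT B =====
-- by_name = set(REQUIRED)
def byName : PySem.Set String := PySem.Set.ofList REQUIRED

-- lengths = sorted({len(r) for r in REQUIRED})
def reqLengths : List Int :=
  PySem.List.sorted (PySem.Set.ofList (REQUIRED.map (fun r => PySem.Str.len r))) (fun x => x) false

-- the suffix slice path[n - L:]
def tailOf (path : String) (L : Int) : String :=
  PySem.Str.slice path (some (PySem.Str.len path - L)) none

-- found = the set built by the double loop over paths and lengths
def foundSet (existing : List String) : PySem.Set String :=
  existing.foldl
    (fun found path =>
      reqLengths.foldl
        (fun found L =>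
          if L ≤ PySem.Str.len path then
            if PySem.Set.contains byName (tailOf path L) then PySem.Set.add found (tailOf path L)
            else found
          else found)
        found)
    PySem.Set.empty

def resolve_presence_py_alt (existing : List String) : List String × List String :=
  let found := foundSet existing
  (REQUIRED.filter (fun r => PySem.Set.contains found r),
   REQUIRED.filter (fun r => !(PySem.Set.contains found r)))

-- ===== PRECONDITION & SPEC =====
def Spec_resolve_presence_py (existing : List String) (out : List String × List String) : Prop := out = resolve_presence_py_alt existing
instance (existing : List String) (out : List String × List String) : Decidable (Spec_resolve_presence_py existing out) := by unfold Spec_resolve_presence_py; infer_instance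

-- ===== CLAIM =====
def Claim_equal_resolve_presence_py : Prop := ∀ (existing : List String), Dom_resolve_presence_py existing → Spec_resolve_presence_py existing (resolve_presence_py existing)

-- ===== LEMMAS AND PROOFS =====

-- A's paired-accumulator loop is the two filters of REQUIRED by the any-test.
theorem foldl_pair_filter (l : List String) (p : String → Bool) (a b : List String) :
    l.foldl (fun acc req => if p req then (acc.1 ++ [req], acc.2) else (acc.1, acc.2 ++ [req])) (a, b)
      = (a ++ l.filter p, b ++ l.filter (fun r => !(p r))) := by
  induction l generalizing a b with
  | nil => simp
  | cons x xs ih =>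
    by_cases h : p x = true <;> simp [h, ih]

-- For 0 ≤ L ≤ len path: the slice equals r iff r has length L and is a suffix of path.
theorem tailOf_eq_iff (path r : String) (L : Int) (hL0 : 0 ≤ L)
    (hL : L ≤ (path.toList.length : Int)) :
    tailOf path L = r ↔ ((r.toList.length : Int) = L ∧ r.toList <:+ path.toList) := by
  have hslice : (tailOf path L).toList = path.toList.drop (path.toList.length - L.toNat) := by
    unfold tailOf
    have h1 : PySem.Str.len path - L = ((path.toList.length - L.toNat : Nat) : Int) := by
      rw [PySem.Str.len_eq]; omega
    rw [h1]
    simp [PySem.Str.toList_slice, PySem.Chars.slice_eq_listSlice, PySem.List.slice_from_natCast]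
  constructor
  · rintro rfl
    refine ⟨?_, ?_⟩
    · rw [hslice, List.length_drop]; omega
    · rw [hslice]; exact List.drop_suffix _ _
  · rintro ⟨hlen, t, ht⟩
    have hd : (tailOf path L).toList = r.toList := by
      rw [hslice, ← ht]
      have h2 : (t ++ r.toList).length - L.toNat = t.length := by
        simp only [List.length_append]; omega
      rw [h2, List.drop_left]
    exact String.ext (by simpa using hd)

-- membership after the inner loop over the lengths
theorem mem_inner (path : String) (ls : List Int) (s : PySem.Set String) (r : String) :
    r ∈ ls.foldl
        (fun found L =>
          if L ≤ PySem.Str.len path then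
            if PySem.Set.contains byName (tailOf path L) then PySem.Set.add found (tailOf path L)
            else found
          else found)
        s
      ↔ r ∈ s ∨ (∃ L ∈ ls, L ≤ PySem.Str.len path ∧ tailOf path L = r ∧ r ∈ REQUIRED) := by
  induction ls generalizing s with
  | nil => simp
  | cons x xs ih =>
    simp only [List.foldl_cons]
    by_cases hx : x ≤ PySem.Str.len path
    · by_cases hc : PySem.Set.contains byName (tailOf path x) = true
      · simp only [hx, if_pos, hc, ih, PySem.Set.mem_add]
        constructor
        · rintro ((hr | rfl) | ⟨L, hL, h1, h2, h3⟩)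
          · exact Or.inl hr
          · refine Or.inr ⟨x, List.mem_cons_self .., hx, rfl, ?_⟩
            have := (PySem.Set.contains_iff _ _).mp hc
            simpa [byName, PySem.Set.mem_ofList] using this
          · exact Or.inr ⟨L, List.mem_cons_of_mem _ hL, h1, h2, h3⟩
        · rintro (hr | ⟨L, hL, h1, h2, h3⟩)
          · exact Or.inl (Or.inl hr)
          · rcases List.mem_cons.mp hL with rfl | hL
            · exact Or.inl (Or.inr h2.symm)
            · exact Or.inr ⟨L, hL, h1, h2, h3⟩
      · simp only [hx, if_pos, hc, if_neg, Bool.false_eq_true, not_false_iff, ih]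
        constructor
        · rintro (hr | ⟨L, hL, h1, h2, h3⟩)
          · exact Or.inl hr
          · exact Or.inr ⟨L, List.mem_cons_of_mem _ hL, h1, h2, h3⟩
        · rintro (hr | ⟨L, hL, h1, h2, h3⟩)
          · exact Or.inl hr
          · rcases List.mem_cons.mp hL with rfl | hL
            · exfalso
              apply hc
              rw [h2, PySem.Set.contains_iff]
              simpa [byName, PySem.Set.mem_ofList] using h3
            · exact Or.inr ⟨L, hL, h1, h2, h3⟩
    · simp only [hx, if_neg, not_false_iff, ih]
      constructor
      · rintro (hr | ⟨L, hL, h1, h2, h3⟩)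
        · exact Or.inl hr
        · exact Or.inr ⟨L, List.mem_cons_of_mem _ hL, h1, h2, h3⟩
      · rintro (hr | ⟨L, hL, h1, h2, h3⟩)
        · exact Or.inl hr
        · rcases List.mem_cons.mp hL with rfl | hL
          · exact absurd h1 hx
          · exact Or.inr ⟨L, hL, h1, h2, h3⟩

-- the per-path condition is exactly 'r is a required name that path ends with'
theorem inner_cond_iff (path r : String) (hr : r ∈ REQUIRED) :
    (∃ L ∈ reqLengths, L ≤ PySem.Str.len path ∧ tailOf path L = r ∧ r ∈ REQUIRED)
      ↔ PySem.Str.endswith path r = true := by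
  have hmemlen : ((r.toList.length : Int)) ∈ reqLengths := by
    unfold reqLengths
    rw [PySem.List.mem_sorted, PySem.Set.mem_ofList, List.mem_map]
    exact ⟨r, hr, (PySem.Str.len_eq r)⟩
  constructor
  · rintro ⟨L, hLmem, h1, h2, _⟩
    have hL0 : 0 ≤ L := by
      unfold reqLengths at hLmem
      rw [PySem.List.mem_sorted, PySem.Set.mem_ofList, List.mem_map] at hLmem
      obtain ⟨q, _, rfl⟩ := hLmem
      rw [PySem.Str.len_eq]; positivity
    rw [PySem.Str.len_eq] at h1
    obtain ⟨_, hsuf⟩ := (tailOf_eq_iff path r L hL0 h1).mp h2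
    rw [PySem.Str.endswith_eq]
    exact (PySem.Chars.endswith_iff _ _).mpr hsuf
  · intro hew
    rw [PySem.Str.endswith_eq] at hew
    have hsuf := (PySem.Chars.endswith_iff _ _).mp hew
    have hle : r.toList.length ≤ path.toList.length := hsuf.length_le
    refine ⟨(r.toList.length : Int), hmemlen, by rw [PySem.Str.len_eq]; omega, ?_, hr⟩
    exact (tailOf_eq_iff path r _ (by positivity) (by omega)).mpr ⟨rfl, hsuf⟩

-- membership in the found-set built by B's outer pass (generalized accumulator)
theorem mem_found_aux (ex : List String) (s : PySem.Set String) (r : String) :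
    r ∈ ex.foldl
        (fun found path =>
          reqLengths.foldl
            (fun found L =>
              if L ≤ PySem.Str.len path then
                if PySem.Set.contains byName (tailOf path L) then PySem.Set.add found (tailOf path L)
                else found
              else found)
            found)
        s
      ↔ r ∈ s ∨ ∃ path ∈ ex, ∃ L ∈ reqLengths, L ≤ PySem.Str.len path ∧ tailOf path L = r ∧ r ∈ REQUIRED := by
  induction ex generalizing s with
  | nil => simp
  | cons x xs ih =>
    simp only [List.foldl_cons]
    rw [ih, mem_inner]
    constructor
    · rintro ((hr | hx) | ⟨path, hp, rest⟩)
      · exact Or.inl hr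
      · exact Or.inr ⟨x, List.mem_cons_self .., hx⟩
      · exact Or.inr ⟨path, List.mem_cons_of_mem _ hp, rest⟩
    · rintro (hr | ⟨path, hp, rest⟩)
      · exact Or.inl (Or.inl hr)
      · rcases List.mem_cons.mp hp with rfl | hp
        · exact Or.inl (Or.inr rest)
        · exact Or.inr ⟨path, hp, rest⟩

theorem contains_foundSet (ex : List String) (r : String) (hr : r ∈ REQUIRED) :
    PySem.Set.contains (foundSet ex) r = ex.any (fun path => PySem.Str.endswith path r) := by
  have key : r ∈ foundSet ex ↔ ∃ path ∈ ex, PySem.Str.endswith path r = true := by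
    rw [show foundSet ex
        = ex.foldl
            (fun found path =>
              reqLengths.foldl
                (fun found L =>
                  if L ≤ PySem.Str.len path then
                    if PySem.Set.contains byName (tailOf path L) then PySem.Set.add found (tailOf path L)
                    else found
                  else found)
                found)
            PySem.Set.empty from rfl,
        mem_found_aux]
    simp only [PySem.Set.empty, List.not_mem_nil, false_or]
    constructor
    · rintro ⟨path, hp, cond⟩
      exact ⟨path, hp, (inner_cond_iff path r hr).mp cond⟩
    · rintro ⟨path, hp, hew⟩
      exact ⟨path, hp, (inner_cond_iff path r hr).mpr hew⟩
  by_cases hm : r ∈ foundSet ex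
  · obtain ⟨path, hp, hew⟩ := key.mp hm
    rw [(PySem.Set.contains_iff _ _).mpr hm]
    exact (List.any_eq_true.mpr ⟨path, hp, hew⟩).symm
  · have h1 : PySem.Set.contains (foundSet ex) r = false :=
      Bool.eq_false_iff.mpr (fun hc => hm ((PySem.Set.contains_iff _ _).mp hc))
    rw [h1]
    symm
    rw [List.any_eq_false]
    intro path hp
    by_cases hew : PySem.Str.endswith path r = true
    · exact absurd (key.mpr ⟨path, hp, hew⟩) hm
    · simpa using hew

-- ===== VERDICT =====
theorem resolve_presence_py_spec : Claim_equal_resolve_presence_py := by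
  intro existing _
  unfold Spec_resolve_presence_py resolve_presence_py resolve_presence_py_alt
  rw [foldl_pair_filter]
  simp only [List.nil_append]
  have h1 : List.filter (fun r => PySem.Set.contains (foundSet existing) r) REQUIRED
      = List.filter (fun req => existing.any fun path => PySem.Str.endswith path req) REQUIRED :=
    List.filter_congr (fun r hr => contains_foundSet existing r hr)
  have h2 : List.filter (fun r => !(PySem.Set.contains (foundSet existing) r)) REQUIRED
      = List.filter (fun r => !(existing.any fun path => PySem.Str.endswith path r)) REQUIRED :=
    List.filter_congr (fun r hr => by rw [contains_foundSet existing r hr])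
  simp only [h1, h2]
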